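-- pv_equiv track=rewrite | github.com/Jiaweihu08/DS-Alg | Course1/week3_greedy_algorithms/coding_challenge/ex6.py | max_num_prizes
-- ===== SOURCE A (Python) =====
-- def max_num_prizes(n):
-- 	k = []
-- 	i = 1
-- 	while n >= 2 * i + 1:
-- 		k.append(i)
-- 		n -= i
-- 		i += 1
-- 	k.append(n)
-- 	return len(k), k
-- ===== SOURCE B (Python) =====
-- def max_num_prizes(n):
--     if n < 1:
--         return 1, [n]
--     # binary search for the largest k with k*(k+1)//2 <= n
--     lo, hi = 1, n
--     while lo < hi:
--         mid = (lo + hi + 1) // 2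
--         if mid * (mid + 1) // 2 <= n:
--             lo = mid
--         else:
--             hi = mid - 1
--     k = lo
--     prizes = list(range(1, k)) + [n - (k - 1) * k // 2]
--     return len(prizes), prizes
-- ===== Notes on version B (the rewrite author's own statement) =====
-- stated objective: alternative
-- what changed: Replaces A's subtract-and-append while loop with a binary search for the number of terms k (the largest k whose triangular number is at most n) followed by a direct range construction of the prize list.
import Mathlib
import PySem

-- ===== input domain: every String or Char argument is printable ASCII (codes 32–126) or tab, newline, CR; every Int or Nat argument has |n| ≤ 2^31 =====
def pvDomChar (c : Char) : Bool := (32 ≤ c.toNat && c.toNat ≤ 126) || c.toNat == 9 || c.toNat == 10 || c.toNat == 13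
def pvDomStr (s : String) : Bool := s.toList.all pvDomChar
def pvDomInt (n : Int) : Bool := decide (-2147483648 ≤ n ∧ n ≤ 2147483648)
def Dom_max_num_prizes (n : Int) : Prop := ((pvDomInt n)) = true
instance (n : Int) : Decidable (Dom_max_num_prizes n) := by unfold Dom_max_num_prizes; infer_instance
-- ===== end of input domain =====

-- B replaces A's subtract-and-append loop by a binary search for the term count k
-- (largest k with k*(k+1)//2 ≤ n) plus a direct range construction (objective: alternative).

-- ===== PORT A =====
-- A's while loop; fuel only makes the recursion total (n.toNat + 1 steps always suffice,
-- since each iteration decreases n by i ≥ 1 and runs only while n ≥ 3).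
def pvALoop : Nat → Int → Int → List Int → Int × List Int
  | 0, n, _i, acc => (((acc ++ [n]).length : Int), acc ++ [n])
  | fuel + 1, n, i, acc =>
    if 2 * i + 1 ≤ n then pvALoop fuel (n - i) (i + 1) (acc ++ [i])
    else (((acc ++ [n]).length : Int), acc ++ [n])

def max_num_prizes (n : Int) : Int × List Int := pvALoop (n.toNat + 1) n 1 []

-- ===== PORT B =====
-- Source B's binary-search loop; fuel only makes the recursion total (the interval width
-- hi - lo < n.toNat + 1 shrinks every iteration).
def pvBSearch : Nat → Int → Int → Int → Int
  | 0, _n, lo, _hi => lo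
  | fuel + 1, n, lo, hi =>
    if lo < hi then
      let mid := PySem.Int.floordiv (lo + hi + 1) 2
      if PySem.Int.floordiv (mid * (mid + 1)) 2 ≤ n then pvBSearch fuel n mid hi
      else pvBSearch fuel n lo (mid - 1)
    else lo

def max_num_prizes_alt (n : Int) : Int × List Int :=
  if n < 1 then (1, [n])
  else
    let k := pvBSearch (n.toNat + 1) n 1 n
    let prizes := PySem.List.pyRange 1 k 1 ++ [n - PySem.Int.floordiv ((k - 1) * k) 2]
    ((prizes.length : Int), prizes)

-- ===== PRECONDITION & SPEC =====
def Spec_max_num_prizes (n : Int) (out : Int × List Int) : Prop := out = max_num_prizes_alt n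
instance (n : Int) (out : Int × List Int) : Decidable (Spec_max_num_prizes n out) := by unfold Spec_max_num_prizes; infer_instance

-- ===== CLAIM (what is proved, stated in full; the proofs are below) =====
def Claim_equal_max_num_prizes : Prop := ∀ (n : Int), Dom_max_num_prizes n → Spec_max_num_prizes n (max_num_prizes n)

-- ===== LEMMAS AND PROOFS =====

/-- The triangular number `m*(m+1) // 2`, as both ports compute it. -/
def pvTri (m : Int) : Int := PySem.Int.floordiv (m * (m + 1)) 2

lemma pvTri_two (m : Int) : 2 * pvTri m = m * (m + 1) := by
  obtain ⟨r, hr⟩ := Int.even_mul_succ_self m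
  unfold pvTri
  rw [PySem.Int.floordiv_eq_ediv_of_pos (by omega)]
  omega

lemma pvTri_succ (m : Int) : pvTri (m + 1) = pvTri m + (m + 1) := by
  have h1 := pvTri_two m
  have h2 := pvTri_two (m + 1)
  have : (m + 1) * (m + 1 + 1) = m * (m + 1) + 2 * (m + 1) := by ring
  omega

lemma pvTri_mono {a b : Int} (ha : 0 ≤ a) (hab : a ≤ b) : pvTri a ≤ pvTri b := by
  have h1 := pvTri_two a
  have h2 := pvTri_two b
  nlinarith

lemma pvBSearch_correct (n : Int) :
    ∀ (fuel : Nat) (lo hi : Int), 1 ≤ lo → lo ≤ hi → pvTri lo ≤ n → n < pvTri (hi + 1) →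
      hi - lo < fuel →
      (1 ≤ pvBSearch fuel n lo hi ∧ pvTri (pvBSearch fuel n lo hi) ≤ n ∧
        n < pvTri (pvBSearch fuel n lo hi + 1)) := by
  intro fuel
  induction fuel with
  | zero => intro lo hi _ _ _ _ hf; omega
  | succ fuel ih =>
    intro lo hi hlo hlh htlo hthi hf
    by_cases h : lo < hi
    · have hmid1 : lo + 1 ≤ PySem.Int.floordiv (lo + hi + 1) 2 := by
        rw [PySem.Int.le_floordiv_iff_mul_le (by omega)]; omega
      have hmid2 : PySem.Int.floordiv (lo + hi + 1) 2 ≤ hi := by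
        have := (PySem.Int.floordiv_lt_iff_lt_mul (a := lo + hi + 1) (b := 2) (q := hi + 1) (by omega)).mpr (by omega)
        omega
      simp only [pvBSearch, if_pos h]
      set mid := PySem.Int.floordiv (lo + hi + 1) 2 with hmiddef
      by_cases h2 : PySem.Int.floordiv (mid * (mid + 1)) 2 ≤ n
      · rw [if_pos h2]
        exact ih mid hi (by omega) (by omega) h2 hthi (by omega)
      · rw [if_neg h2]
        have : n < pvTri mid := by unfold pvTri; omega
        have : n < pvTri ((mid - 1) + 1) := by simpa using this
        exact ih lo (mid - 1) hlo (by omega) htlo this (by omega)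
    · simp only [pvBSearch, if_neg h]
      have : hi = lo := by omega
      subst this
      exact ⟨hlo, htlo, hthi⟩

lemma pvALoop_eq (n k : Int) (hk : 1 ≤ k) (h1 : pvTri k ≤ n) (h2 : n < pvTri (k + 1)) :
    ∀ (fuel : Nat) (i : Int) (acc : List Int), 1 ≤ i → i ≤ k → k - i < fuel →
      pvALoop fuel (n - pvTri (i - 1)) i acc
        = ((acc.length : Int) + (k - i + 1),
           acc ++ PySem.List.pyRange i k 1 ++ [n - pvTri (k - 1)]) := by
  intro fuel
  induction fuel with
  | zero => intro i acc _ _ hf; omega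
  | succ fuel ih =>
    intro i acc hi hik hf
    by_cases hlt : i < k
    · -- loop guard holds: 2*i+1 ≤ n - tri(i-1) ⟺ tri(i+1) ≤ n
      have hsucc1 : pvTri i = pvTri (i - 1) + i := by
        have := pvTri_succ (i - 1); simpa using this
      have hsucc2 : pvTri (i + 1) = pvTri i + (i + 1) := pvTri_succ i
      have hmono : pvTri (i + 1) ≤ pvTri k := pvTri_mono (by omega) (by omega)
      have hguard : 2 * i + 1 ≤ n - pvTri (i - 1) := by omega
      simp only [pvALoop, if_pos hguard]
      have harg : n - pvTri (i - 1) - i = n - pvTri ((i + 1) - 1) := by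
        simp only [add_sub_cancel_right]; omega
      rw [harg, ih (i + 1) (acc ++ [i]) (by omega) (by omega) (by omega)]
      rw [PySem.List.pyRange_one_cons hlt]
      simp only [Prod.mk.injEq, List.length_append, List.length_singleton]
      refine ⟨by push_cast; omega, by simp⟩
    · -- i = k: the guard fails, the loop stops
      have hik' : i = k := by omega
      subst hik'
      have hsucc2 : pvTri (i + 1) = pvTri i + (i + 1) := pvTri_succ i
      have hguard : ¬ (2 * i + 1 ≤ n - pvTri (i - 1)) := by
        have : pvTri i = pvTri (i - 1) + i := by
          have := pvTri_succ (i - 1); simpa using this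
        omega
      simp only [pvALoop, if_neg hguard]
      rw [PySem.List.pyRange_one_eq_nil (by omega)]
      simp only [Prod.mk.injEq, List.length_append, List.length_singleton, List.append_nil]
      refine ⟨by push_cast; omega, by simp⟩

-- ===== VERDICT (by name: the statement is the Claim_ definition above) =====
theorem max_num_prizes_spec : Claim_equal_max_num_prizes := by
  intro n _hdom
  unfold Spec_max_num_prizes max_num_prizes max_num_prizes_alt
  by_cases hn : n < 1
  · -- the loop never runs
    have : n.toNat = 0 := by omega
    rw [this]
    simp only [pvALoop, if_neg (by omega : ¬ (2 * 1 + 1 ≤ n))]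
    rw [if_pos hn]
    simp
  · rw [if_neg hn]
    -- pick k from the binary search
    have htlo : pvTri 1 ≤ n := by
      have := pvTri_two 1; unfold pvTri at *; omega
    have hthi : n < pvTri (n + 1) := by
      have := pvTri_two (n + 1); nlinarith
    obtain ⟨hk1, hk2, hk3⟩ :=
      pvBSearch_correct n (n.toNat + 1) 1 n (le_refl 1) (by omega) htlo hthi (by omega)
    set k := pvBSearch (n.toNat + 1) n 1 n with hkdef
    have hkn : k ≤ n := by
      have := pvTri_two k; nlinarith
    have hstart : n - pvTri 0 = n := by
      have : pvTri 0 = 0 := by have := pvTri_two 0; omega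
      omega
    have := pvALoop_eq n k hk1 hk2 hk3 (n.toNat + 1) 1 [] (le_refl 1) hk1 (by omega)
    simp only [show (1 : Int) - 1 = 0 from rfl, hstart, List.nil_append, List.length_nil] at this
    have htri : n - pvTri (k - 1) = n - PySem.Int.floordiv ((k - 1) * k) 2 := by
      unfold pvTri; rw [show (k - 1) * (k - 1 + 1) = (k - 1) * k by ring]
    rw [this, htri]
    show _ = (((PySem.List.pyRange 1 k 1 ++ [n - PySem.Int.floordiv ((k - 1) * k) 2]).length : Int),
      PySem.List.pyRange 1 k 1 ++ [n - PySem.Int.floordiv ((k - 1) * k) 2])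
    simp only [Prod.mk.injEq, List.length_append, PySem.List.length_pyRange_one, List.length_singleton]
    refine ⟨by push_cast; omega, trivial⟩
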